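-- pv_equiv track=rewrite | github.com/Rubinjo/HWGAN | helper/conversion.py | findLowStreaks
-- ===== SOURCE A (Python) =====
-- def findLowStreaks(scores, tresh = 0):
--     streaks = []
--     streakInProgress = False
--     streak = []
--     for i in range(len(scores)):
--         if scores[i] <= tresh:
--             if streakInProgress == False:
--                 streakInProgress = True
--             streak.append(i)
--         else:
--             if streakInProgress:
--                 streaks.append(streak)
--                 streak = []
--                 streakInProgress = False
--     if streakInProgress:
--         streaks.append(streak)
--     return streaks
-- ===== SOURCE B (Python) =====
-- def findLowStreaks(scores, tresh=0):
--     # Two-pointer run scan: jump from the start of each low run directly to its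
--     # end, emitting the whole run as a range; no boolean state machine, no flush.
--     streaks = []
--     n = len(scores)
--     i = 0
--     while i < n:
--         if scores[i] <= tresh:
--             j = i
--             while j < n and scores[j] <= tresh:
--                 j += 1
--             streaks.append(list(range(i, j)))
--             i = j
--         else:
--             i += 1
--     return streaks
-- ===== Notes on version B (the rewrite author's own statement) =====
-- stated objective: alternative
-- what changed: Replaces A's per-element boolean state machine (streakInProgress flag, incremental append, end-of-loop flush) with a two-pointer scan that finds the end of each low run with an inner scan and emits the whole run at once as list(range(i, j)).
import Mathlib
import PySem

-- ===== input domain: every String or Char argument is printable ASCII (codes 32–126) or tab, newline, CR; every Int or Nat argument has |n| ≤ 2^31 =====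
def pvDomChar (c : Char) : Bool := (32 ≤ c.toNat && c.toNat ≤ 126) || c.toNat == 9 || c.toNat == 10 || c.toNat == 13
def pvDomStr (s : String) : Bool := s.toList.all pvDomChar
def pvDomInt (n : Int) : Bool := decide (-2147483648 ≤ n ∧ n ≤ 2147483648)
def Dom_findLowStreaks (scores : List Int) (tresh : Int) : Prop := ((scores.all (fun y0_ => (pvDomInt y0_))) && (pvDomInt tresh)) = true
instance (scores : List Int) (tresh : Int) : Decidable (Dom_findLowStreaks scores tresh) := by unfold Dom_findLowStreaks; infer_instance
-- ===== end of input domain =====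

-- B replaces A's boolean state machine with a two-pointer run scan (alternative decomposition, same cost).

-- ===== PORT A =====
def findLowStreaks (scores : List Int) (tresh : Int) : List (List Int) :=
  let st := (PySem.List.pyRange 0 (PySem.List.len scores) 1).foldl
    (fun (st : List (List Int) × Bool × List Int) i =>
      if PySem.List.pyGetD scores i 0 ≤ tresh then
        (st.1, true, st.2.2 ++ [i])
      else if st.2.1 then
        (st.1 ++ [st.2.2], false, ([] : List Int))
      else st)
    ([], false, [])
  if st.2.1 then st.1 ++ [st.2.2] else st.1

-- ===== PORT B =====
-- inner 'while j < n and scores[j] <= tresh: j += 1'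
-- (structural fuel recursion: the fuel (n - j).toNat is a totality device only; the
--  loop itself always stops at j = n, so the fuel is never exhausted early)
def scanEndF (scores : List Int) (tresh n : Int) : Nat → Int → Int
  | 0, j => j
  | fuel + 1, j =>
    if j < n ∧ PySem.List.pyGetD scores j 0 ≤ tresh then
      scanEndF scores tresh n fuel (j + 1)
    else j

def scanEnd (scores : List Int) (tresh n j : Int) : Int :=
  scanEndF scores tresh n (n - j).toNat j

-- outer while loop (fuel (n - i).toNat, same totality device)
def altLoopF (scores : List Int) (tresh n : Int) : Nat → Int → List (List Int) → List (List Int)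
  | 0, _, streaks => streaks
  | fuel + 1, i, streaks =>
    if i < n then
      if PySem.List.pyGetD scores i 0 ≤ tresh then
        altLoopF scores tresh n fuel (scanEnd scores tresh n i)
          (streaks ++ [PySem.List.pyRange i (scanEnd scores tresh n i) 1])
      else altLoopF scores tresh n fuel (i + 1) streaks
    else streaks

def findLowStreaks_alt (scores : List Int) (tresh : Int) : List (List Int) :=
  altLoopF scores tresh (PySem.List.len scores) (PySem.List.len scores).toNat 0 []

-- ===== PRECONDITION & SPEC =====
def Spec_findLowStreaks (scores : List Int) (tresh : Int) (out : List (List Int)) : Prop := out = findLowStreaks_alt scores tresh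
instance (scores : List Int) (tresh : Int) (out : List (List Int)) : Decidable (Spec_findLowStreaks scores tresh out) := by unfold Spec_findLowStreaks; infer_instance

-- ===== CLAIM (what is proved, stated in full; the proofs are below) =====
def Claim_equal_findLowStreaks : Prop := ∀ (scores : List Int) (tresh : Int), Dom_findLowStreaks scores tresh → Spec_findLowStreaks scores tresh (findLowStreaks scores tresh)

-- ===== LEMMAS AND PROOFS =====

-- the common specification: maximal runs of consecutive indices whose key is true
def TR (k : Int → Bool) : List Int → List (List Int)
  | [] => []
  | [a] => if k a then [[a]] else []
  | a :: b :: l =>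
    if k a then
      if k b then (TR k (b :: l)).modifyHead (a :: ·) else [a] :: TR k (b :: l)
    else TR k (b :: l)

-- A's loop body and finaliser, with the key abstracted
def stepF (k : Int → Bool) (st : List (List Int) × Bool × List Int) (i : Int) :
    List (List Int) × Bool × List Int :=
  if k i then (st.1, true, st.2.2 ++ [i])
  else if st.2.1 then (st.1 ++ [st.2.2], false, ([] : List Int))
  else st

def finalA (st : List (List Int) × Bool × List Int) : List (List Int) :=
  if st.2.1 then st.1 ++ [st.2.2] else st.1

-- A's loop state with a pending (nonempty) run
def TRpend (k : Int → Bool) (run : List Int) : List Int → List (List Int)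
  | [] => [run]
  | a :: l => if k a then (TR k (a :: l)).modifyHead (run ++ ·) else run :: TR k (a :: l)

theorem TR_cons_false {k : Int → Bool} {a : Int} (l : List Int) (ha : k a = false) :
    TR k (a :: l) = TR k l := by
  cases l <;> simp [TR, ha]

theorem TR_head {k : Int → Bool} : ∀ (l : List Int) (a : Int), k a = true →
    ∃ g gs, TR k (a :: l) = (a :: g) :: gs := by
  intro l
  induction l with
  | nil => intro a ha; exact ⟨[], [], by simp [TR, ha]⟩
  | cons b l ih =>
    intro a ha
    by_cases hb : k b
    · obtain ⟨g, gs, hg⟩ := ih b hb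
      exact ⟨b :: g, gs, by simp [TR, ha, hb, hg]⟩
    · exact ⟨[], TR k (b :: l), by simp [TR, ha, hb]⟩

theorem TRpend_snoc {k : Int → Bool} {a : Int} (ha : k a = true) :
    ∀ (l : List Int) (run : List Int),
    TRpend k (run ++ [a]) l = if run.isEmpty then TR k (a :: l) else TRpend k run (a :: l) := by
  intro l run
  cases l with
  | nil =>
    cases run <;> simp [TRpend, TR, ha]
  | cons b l =>
    by_cases hb : k b
    · obtain ⟨g, gs, hg⟩ := TR_head (l := l) b hb
      have hT : TR k (a :: b :: l) = ((a :: b :: g) :: gs) := by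
        simp [TR, ha, hb, hg]
      cases run with
      | nil => simp [TRpend, hb, hg, hT]
      | cons r rs => simp [TRpend, hb, ha, hg, hT]
    · have hT : TR k (a :: b :: l) = [a] :: TR k (b :: l) := by
        simp [TR, ha, hb]
      cases run with
      | nil => simp [TRpend, hb, hT]
      | cons r rs => simp [TRpend, hb, ha, hT]

theorem A_loop (k : Int → Bool) : ∀ (l : List Int) (streaks : List (List Int)) (run : List Int),
    finalA (l.foldl (stepF k) (streaks, !run.isEmpty, run)) =
      streaks ++ (if run.isEmpty then TR k l else TRpend k run l) := by
  intro l
  induction l with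
  | nil =>
    intro streaks run
    cases run <;> simp [finalA, TR, TRpend]
  | cons a l ih =>
    intro streaks run
    by_cases ha : k a
    · have hstep : stepF k (streaks, !run.isEmpty, run) a = (streaks, !(run ++ [a]).isEmpty, run ++ [a]) := by
        simp [stepF, ha]
      rw [List.foldl_cons, hstep, ih streaks (run ++ [a])]
      simp only [List.isEmpty_iff]
      rw [TRpend_snoc ha l run]
      simp
    · by_cases hrun : run.isEmpty
      · have hrn : run = [] := List.isEmpty_iff.mp hrun
        subst hrn
        have hstep : stepF k (streaks, !([] : List Int).isEmpty, ([] : List Int)) a = (streaks, !([] : List Int).isEmpty, ([] : List Int)) := by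
          simp [stepF, ha]
        rw [List.foldl_cons, hstep, ih streaks []]
        simp [TR_cons_false l ((Bool.not_eq_true _).mp ha)]
      · have hstep : stepF k (streaks, !run.isEmpty, run) a = (streaks ++ [run], !([] : List Int).isEmpty, ([] : List Int)) := by
          simp [stepF, ha, hrun]
        rw [List.foldl_cons, hstep, ih (streaks ++ [run]) []]
        simp [TRpend, ha, TR_cons_false l ((Bool.not_eq_true _).mp ha), hrun]

-- TR over a contiguous range splits off a maximal true run
theorem TR_run (k : Int → Bool) (n : Int) : ∀ (i j : Int), i < j → j ≤ n →
    (∀ m, i ≤ m → m < j → k m = true) → (j = n ∨ k j = false) →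
    TR k (PySem.List.pyRange i n 1) = PySem.List.pyRange i j 1 :: TR k (PySem.List.pyRange j n 1) := by
  intro i j
  induction hm : (j - i).toNat using Nat.strong_induction_on generalizing i with
  | _ m ihm =>
    intro hij hjn hall hend
    have hin : i < n := by omega
    rw [PySem.List.pyRange_one_cons hin]
    rcases eq_or_lt_of_le (show i + 1 ≤ j by omega) with hj1 | hj1
    · -- the run is exactly [i]
      have hrange : PySem.List.pyRange i j 1 = [i] := by
        rw [← hj1]; exact PySem.List.pyRange_one_singleton i
      rcases eq_or_lt_of_le (show j ≤ n from hjn) with hjn' | hjn'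
      · subst hjn'
        rw [show PySem.List.pyRange (i+1) j 1 = [] from hj1 ▸ PySem.List.pyRange_one_eq_nil (le_refl _)]
        simp [TR, hall i (le_refl _) hij, hrange]
      · have hkj : k j = false := by
          rcases hend with h | h
          · omega
          · exact h
        rw [show PySem.List.pyRange (i+1) n 1 = j :: PySem.List.pyRange (j+1) n 1 by
              rw [hj1]; exact PySem.List.pyRange_one_cons hjn']
        rw [show PySem.List.pyRange j n 1 = j :: PySem.List.pyRange (j+1) n 1 from
              PySem.List.pyRange_one_cons hjn']
        simp [TR, hall i (le_refl _) hij, hkj, hrange, TR_cons_false _ hkj]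
    · -- the run continues at i+1
      have hi1n : i + 1 < n := by omega
      rw [show PySem.List.pyRange (i+1) n 1 = (i+1) :: PySem.List.pyRange (i+1+1) n 1 from
            PySem.List.pyRange_one_cons hi1n]
      have hih := ihm (j - (i+1)).toNat (by omega) (i+1) rfl hj1 hjn
        (fun m hm1 hm2 => hall m (by omega) hm2) hend
      rw [show PySem.List.pyRange (i+1) n 1 = (i+1) :: PySem.List.pyRange (i+1+1) n 1 from
            PySem.List.pyRange_one_cons hi1n] at hih
      simp only [TR, hall i (le_refl _) hij, hall (i+1) (by omega) hj1, if_true]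
      rw [hih]
      rw [PySem.List.pyRange_one_cons hij]
      simp [List.modifyHead]

theorem scanEndF_ge (scores : List Int) (tresh n : Int) :
    ∀ (fuel : Nat) (j : Int), j ≤ scanEndF scores tresh n fuel j := by
  intro fuel
  induction fuel with
  | zero => intro j; simp [scanEndF]
  | succ fuel ih =>
    intro j
    rw [scanEndF]
    split
    · have := ih (j + 1); omega
    · omega

theorem scanEnd_gt (scores : List Int) (tresh n j : Int)
    (h1 : j < n) (h2 : PySem.List.pyGetD scores j 0 ≤ tresh) :
    j + 1 ≤ scanEnd scores tresh n j := by
  unfold scanEnd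
  rw [show (n - j).toNat = (n - (j + 1)).toNat + 1 by omega]
  rw [scanEndF]
  simp only [h1, h2, and_self, if_true]
  exact scanEndF_ge scores tresh n _ (j + 1)

theorem scanEndF_spec (scores : List Int) (tresh n : Int) :
    ∀ (fuel : Nat) (i : Int), i ≤ n → (n - i).toNat ≤ fuel →
    i ≤ scanEndF scores tresh n fuel i ∧ scanEndF scores tresh n fuel i ≤ n ∧
    (∀ m, i ≤ m → m < scanEndF scores tresh n fuel i → PySem.List.pyGetD scores m 0 ≤ tresh) ∧
    (scanEndF scores tresh n fuel i = n ∨ ¬ PySem.List.pyGetD scores (scanEndF scores tresh n fuel i) 0 ≤ tresh) := by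
  intro fuel
  induction fuel with
  | zero =>
    intro i hin hf
    have : i = n := by omega
    simp only [scanEndF]
    exact ⟨le_refl _, hin, fun p hp1 hp2 => absurd (lt_of_le_of_lt hp1 hp2) (lt_irrefl _), Or.inl this⟩
  | succ fuel ih =>
    intro i hin hf
    rw [scanEndF]
    split
    · rename_i h
      obtain ⟨h1, h2⟩ := h
      have := ih (i + 1) (by omega) (by omega)
      refine ⟨by omega, this.2.1, ?_, this.2.2.2⟩
      intro p hp1 hp2
      rcases eq_or_lt_of_le hp1 with hp | hp
      · exact hp ▸ h2
      · exact this.2.2.1 p (by omega) hp2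
    · rename_i h
      rcases (Decidable.not_and_iff_not_or_not.mp h) with h' | h'
      · exact ⟨le_refl _, hin, fun p hp1 hp2 => absurd (lt_of_le_of_lt hp1 hp2) (lt_irrefl _), Or.inl (by omega)⟩
      · exact ⟨le_refl _, hin, fun p hp1 hp2 => absurd (lt_of_le_of_lt hp1 hp2) (lt_irrefl _), Or.inr h'⟩

theorem scanEnd_spec (scores : List Int) (tresh n i : Int) (hin : i ≤ n) :
    i ≤ scanEnd scores tresh n i ∧ scanEnd scores tresh n i ≤ n ∧
    (∀ m, i ≤ m → m < scanEnd scores tresh n i → PySem.List.pyGetD scores m 0 ≤ tresh) ∧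
    (scanEnd scores tresh n i = n ∨ ¬ PySem.List.pyGetD scores (scanEnd scores tresh n i) 0 ≤ tresh) :=
  scanEndF_spec scores tresh n (n - i).toNat i hin (le_refl _)

theorem altLoopF_eq (scores : List Int) (tresh n : Int) :
    ∀ (fuel : Nat) (i : Int) (streaks : List (List Int)), i ≤ n → (n - i).toNat ≤ fuel →
    altLoopF scores tresh n fuel i streaks =
      streaks ++ TR (fun m => decide (PySem.List.pyGetD scores m 0 ≤ tresh)) (PySem.List.pyRange i n 1) := by
  intro fuel
  induction fuel with
  | zero =>
    intro i streaks hin hf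
    have : i = n := by omega
    rw [PySem.List.pyRange_one_eq_nil (by omega)]
    simp [altLoopF, TR]
  | succ fuel ih =>
    intro i streaks hin hf
    rw [altLoopF]
    split
    · rename_i hi
      split
      · rename_i hl
        obtain ⟨hge, hle, hall, hend⟩ := scanEnd_spec scores tresh n i (by omega)
        have hgt : i + 1 ≤ scanEnd scores tresh n i := scanEnd_gt scores tresh n i hi hl
        rw [ih _ _ hle (by omega)]
        rw [TR_run _ n i (scanEnd scores tresh n i) (by omega) hle
              (fun p hp1 hp2 => decide_eq_true (hall p hp1 hp2))
              (by
                rcases hend with h | h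
                · exact Or.inl h
                · exact Or.inr (decide_eq_false h))]
        simp
      · rename_i hl
        rw [ih _ _ (by omega) (by omega)]
        rw [PySem.List.pyRange_one_cons hi]
        rw [TR_cons_false _ (decide_eq_false hl)]
    · rename_i hi
      rw [PySem.List.pyRange_one_eq_nil (by omega)]
      simp [TR]

-- ===== VERDICT (by name: the statement is the Claim_ definition above) =====
theorem findLowStreaks_spec : Claim_equal_findLowStreaks := by
  intro scores tresh _
  unfold Spec_findLowStreaks findLowStreaks findLowStreaks_alt
  have hk : (fun (st : List (List Int) × Bool × List Int) i =>
      if PySem.List.pyGetD scores i 0 ≤ tresh then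
        (st.1, true, st.2.2 ++ [i])
      else if st.2.1 then (st.1 ++ [st.2.2], false, ([] : List Int))
      else st) = stepF (fun m => decide (PySem.List.pyGetD scores m 0 ≤ tresh)) := by
    funext st i
    by_cases h : PySem.List.pyGetD scores i 0 ≤ tresh <;> simp [stepF, h]
  simp only [hk]
  have h0 : (([] : List (List Int)), false, ([] : List Int))
      = (([] : List (List Int)), !([] : List Int).isEmpty, ([] : List Int)) := by simp
  rw [h0]
  have hA := A_loop (fun m => decide (PySem.List.pyGetD scores m 0 ≤ tresh))
    (PySem.List.pyRange 0 (PySem.List.len scores) 1) [] []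
  simp only [finalA] at hA
  rw [hA]
  rw [altLoopF_eq scores tresh (PySem.List.len scores) (PySem.List.len scores).toNat 0 [] (by simp) (le_refl _)]
  simp
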